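-- pv_equiv track=rewrite | github.com/spongebob03/online-algorithm-study | bmo/week4/더 맵게.py | solution
-- ===== SOURCE A (Python) =====
-- import heapq
--
-- def solution(scoville, K):
--     answer = 0
--     heapq.heapify(scoville)
--
--     while scoville:
--         min1 = heapq.heappop(scoville)
--         if min1 >= K:
--             return answer
--
--         if not scoville:
--             return -1
--
--         min2 = heapq.heappop(scoville)
--
--         heapq.heappush(scoville, min1 + min2 * 2)
--         answer += 1
-- ===== SOURCE B (Python) =====
-- def solution(scoville, K):
--     s = sorted(scoville)
--     answer = 0
--     i = 0              # front pointer: s[i:] is the live sorted pool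
--     n = len(s)
--     while i < n:
--         if s[i] >= K:
--             return answer
--         if n - i == 1:
--             return -1
--         new = s[i] + 2 * s[i + 1]
--         i += 2
--         # ordered insertion: first position in s[i:n] whose element is not below `new`
--         lo, hi = i, n
--         while lo < hi:
--             mid = (lo + hi) // 2
--             if s[mid] < new:
--                 lo = mid + 1
--             else:
--                 hi = mid
--         s.insert(lo, new)
--         n += 1
--         answer += 1
-- ===== Notes on version B (the rewrite author's own statement) =====
-- stated objective: alternative
-- what changed: Replaces the binary heap with a sorted list: the two smallest values are taken from the front and the mixed value is re-inserted at its binary-searched position, instead of heapify/heappop/heappush; also leaves the argument unmutated (A heapifies it in place).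
-- outside the precondition, e.g. on solution([], 5): A returns None, B returns None
import Mathlib
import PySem

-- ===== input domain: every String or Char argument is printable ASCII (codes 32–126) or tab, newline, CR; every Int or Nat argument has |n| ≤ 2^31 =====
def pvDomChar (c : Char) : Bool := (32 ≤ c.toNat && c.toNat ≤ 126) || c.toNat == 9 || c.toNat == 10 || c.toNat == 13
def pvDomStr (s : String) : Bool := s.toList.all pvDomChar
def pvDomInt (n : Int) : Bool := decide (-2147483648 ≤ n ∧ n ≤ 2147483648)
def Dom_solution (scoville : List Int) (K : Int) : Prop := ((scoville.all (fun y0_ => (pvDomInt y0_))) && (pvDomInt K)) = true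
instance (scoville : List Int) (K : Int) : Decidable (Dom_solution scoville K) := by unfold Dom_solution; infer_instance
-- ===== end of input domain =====

-- B replaces A's binary heap by a sorted list with ordered re-insertion (alternative structure,
-- similar cost); A additionally heapifies its argument in place — the equivalence proved here is
-- about the return value only (B leaves the argument unmutated).

-- ===== PORT A =====
-- heapq is a library call; its operations are ported at their contract: heap[0] / heappop yield
-- the minimum of the current contents (exact for Int elements, which are indistinguishable under ties).
def popMin (x : Int) (xs : List Int) : Int := xs.foldl min x

theorem popMin_mem (x : Int) (xs : List Int) : popMin x xs ∈ x :: xs := by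
  induction xs generalizing x with
  | nil => simp [popMin]
  | cons y ys ih =>
    have h : popMin (min x y) ys ∈ min x y :: ys := ih (min x y)
    have e : popMin x (y :: ys) = popMin (min x y) ys := rfl
    rw [e]
    rcases List.mem_cons.1 h with h | h
    · rw [h]; rcases min_choice x y with h' | h' <;> simp [h']
    · simp [h]

theorem erase_len (x : Int) (xs : List Int) :
    ((x :: xs).erase (popMin x xs)).length = xs.length := by
  have := List.length_erase_of_mem (popMin_mem x xs)
  simpa using this

def goA (scoville : List Int) (K : Int) (answer : Int) : Int :=
  match scoville with
  | [] => 0   -- Python's loop falls through and returns None here; excluded by Pre_solution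
  | x :: xs =>
    -- min1 = heapq.heappop(scoville): the minimum leaves the heap
    if popMin x xs ≥ K then answer
    else
      match h : (x :: xs).erase (popMin x xs) with
      | [] => -1                                -- if not scoville: return -1
      | y :: ys =>
        -- min2 = heapq.heappop(...); heappush(..., min1 + min2 * 2); answer += 1
        goA ((popMin x xs + popMin y ys * 2) :: (y :: ys).erase (popMin y ys)) K (answer + 1)
termination_by scoville.length
decreasing_by
  have h1 := erase_len x xs
  have h2 := erase_len y ys
  rw [h] at h1
  simp only [List.length_cons] at *
  omega

def solution (scoville : List Int) (K : Int) : Int := goA scoville K 0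

-- ===== PORT B =====
-- the inner while of Source B: binary search for the first position whose element is not below `new`
-- (the front pointer i of Source B = consuming the head of the live pool; offsets cancel in (lo+hi)//2).
-- fuel bounds the loop: hi - lo shrinks every pass, so fuel = initial hi suffices.
def bsPos : Nat → List Int → Int → Nat → Nat → Nat
  | 0, _, _, lo, _ => lo
  | fuel + 1, s, new, lo, hi =>
    if lo < hi then
      if s.getD ((lo + hi) / 2) 0 < new then bsPos fuel s new ((lo + hi) / 2 + 1) hi
      else bsPos fuel s new lo ((lo + hi) / 2)
    else lo

theorem mid_bounds {lo hi : Nat} (h : lo < hi) : lo ≤ (lo + hi) / 2 ∧ (lo + hi) / 2 < hi := by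
  omega

theorem bsPos_le (s : List Int) (new : Int) :
    ∀ (fuel lo hi : Nat), lo ≤ hi → bsPos fuel s new lo hi ≤ hi := by
  intro fuel
  induction fuel with
  | zero => intro lo hi h; exact h
  | succ n ih =>
    intro lo hi h
    simp only [bsPos]
    split
    · rename_i hlohi
      obtain ⟨hm1, hm2⟩ := mid_bounds hlohi
      generalize hgen : (lo + hi) / 2 = m at *
      split
      · exact ih _ _ (by omega)
      · exact le_trans (ih _ _ (by omega)) (by omega)
    · exact h

-- s.insert(lo, new) of Source B
def insB (new : Int) (s : List Int) : List Int :=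
  s.take (bsPos s.length s new 0 s.length) ++ new :: s.drop (bsPos s.length s new 0 s.length)

theorem length_insB (new : Int) (s : List Int) : (insB new s).length = s.length + 1 := by
  have h := bsPos_le s new s.length 0 s.length (Nat.zero_le _)
  unfold insB
  rw [List.length_append, List.length_cons, List.length_take, List.length_drop,
    Nat.min_eq_left h]
  omega

def goB (s : List Int) (K : Int) (answer : Int) : Int :=
  match s with
  | [] => 0   -- Python's loop falls through and returns None here; excluded by Pre_solution
  | a :: s' =>
    if a ≥ K then answer
    else
      match s' with
      | [] => -1
      | b :: s'' => goB (insB (a + 2 * b) s'') K (answer + 1)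
termination_by s.length
decreasing_by simp [length_insB]

def solution_alt (scoville : List Int) (K : Int) : Int :=
  goB (PySem.List.sorted scoville (fun x => x)) K 0

-- ===== PRECONDITION & SPEC =====
-- Pre_ excludes only the empty list, where A's while loop falls through and returns None (not an int).
def Pre_solution (scoville : List Int) (K : Int) : Prop := scoville ≠ []
instance (scoville : List Int) (K : Int) : Decidable (Pre_solution scoville K) := by
  unfold Pre_solution; infer_instance
def pvWitness_solution : List Int × Int := ([1, 2, 3, 9, 10, 12], 7)

def Spec_solution (scoville : List Int) (K : Int) (out : Int) : Prop := out = solution_alt scoville K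
instance (scoville : List Int) (K : Int) (out : Int) : Decidable (Spec_solution scoville K out) := by unfold Spec_solution; infer_instance

-- ===== CLAIM (what is proved, stated in full; the proofs are below) =====
def Claim_equal_solution : Prop := ∀ (scoville : List Int) (K : Int), Dom_solution scoville K → Pre_solution scoville K → Spec_solution scoville K (solution scoville K)

-- ===== LEMMAS AND PROOFS =====

-- linear ordered insertion: the reference description of where insB places `new` in a sorted list
def insSorted (x : Int) : List Int → List Int
  | [] => [x]
  | y :: ys => if y < x then y :: insSorted x ys else x :: y :: ys

theorem insSorted_perm (x : Int) (l : List Int) : (insSorted x l).Perm (x :: l) := by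
  induction l with
  | nil => simp [insSorted]
  | cons y ys ih =>
    simp only [insSorted]
    split
    · exact ((ih.cons y).trans (List.Perm.swap x y ys))
    · exact List.Perm.refl _

theorem insSorted_eq_takeWhile (x : Int) (l : List Int) :
    insSorted x l
      = l.takeWhile (fun y => decide (y < x)) ++ x :: l.dropWhile (fun y => decide (y < x)) := by
  induction l with
  | nil => simp [insSorted]
  | cons y ys ih =>
    by_cases h : y < x <;> simp [insSorted, h, ih]

theorem popMin_le (xs : List Int) : ∀ (x : Int), ∀ y ∈ x :: xs, popMin x xs ≤ y := by
  induction xs with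
  | nil =>
    intro x y hy
    simp only [List.mem_cons, List.not_mem_nil, or_false] at hy
    simp [popMin, hy]
  | cons z zs ih =>
    intro x y hy
    have e : popMin x (z :: zs) = popMin (min x z) zs := rfl
    rw [e]
    rcases List.mem_cons.1 hy with h1 | hy2
    · rw [h1]
      exact le_trans (ih (min x z) (min x z) (by simp)) (min_le_left _ _)
    · rcases List.mem_cons.1 hy2 with h2 | hy3
      · rw [h2]
        exact le_trans (ih (min x z) (min x z) (by simp)) (min_le_right _ _)
      · exact ih (min x z) y (by simp [hy3])


theorem mem_insSorted {z x : Int} {l : List Int} :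
    z ∈ insSorted x l ↔ z = x ∨ z ∈ l := by
  simpa using (insSorted_perm x l).mem_iff

theorem insSorted_pairwise {x : Int} {l : List Int}
    (h : l.Pairwise (· ≤ ·)) : (insSorted x l).Pairwise (· ≤ ·) := by
  induction l with
  | nil => simp [insSorted]
  | cons y ys ih =>
    rw [List.pairwise_cons] at h
    simp only [insSorted]
    split
    · rename_i hyx
      refine List.pairwise_cons.2 ⟨?_, ih h.2⟩
      intro z hz
      rcases mem_insSorted.1 hz with rfl | hz
      · exact le_of_lt hyx
      · exact h.1 z hz
    · rename_i hyx
      refine List.pairwise_cons.2 ⟨?_, List.pairwise_cons.2 h⟩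
      intro z hz
      rcases List.mem_cons.1 hz with rfl | hz
      · omega
      · exact le_trans (by omega) (h.1 z hz)


theorem bsPos_eq_of_bounds (s : List Int) (new : Int)
    (p : Nat)
    (hlt : ∀ (k : Nat) (hk : k < s.length), k < p → s[k] < new)
    (hge : ∀ (k : Nat) (hk : k < s.length), p ≤ k → ¬ s[k] < new) :
    ∀ (fuel lo hi : Nat), hi - lo ≤ fuel → lo ≤ p → p ≤ hi → hi ≤ s.length →
      bsPos fuel s new lo hi = p := by
  intro fuel
  induction fuel with
  | zero =>
    intro lo hi h1 h2 h3 h4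
    simp only [bsPos]
    omega
  | succ n ih =>
    intro lo hi h1 h2 h3 h4
    simp only [bsPos]
    split
    · rename_i hlohi
      obtain ⟨hm1, hm2⟩ := mid_bounds hlohi
      generalize hgen : (lo + hi) / 2 = m at *
      have hmlen : m < s.length := by omega
      rw [List.getD_eq_getElem s 0 hmlen]
      split
      · rename_i hmid
        have hmp : m < p := by
          by_contra hcon
          exact hge _ hmlen (by omega) hmid
        exact ih _ _ (by omega) (by omega) h3 h4
      · rename_i hmid
        have hmp : p ≤ m := by
          by_contra hcon
          exact hmid (hlt _ hmlen (by omega))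
        exact ih _ _ (by omega) h2 (by omega) (by omega)
    · omega

theorem take_drop_of_append {α : Type} {tw dw s : List α} (h : tw ++ dw = s) (x : α) :
    s.take tw.length ++ x :: s.drop tw.length = tw ++ x :: dw := by
  subst h
  rw [List.take_left, List.drop_left]

theorem insB_eq_insSorted {new : Int} {s : List Int}
    (hs : s.Pairwise (· ≤ ·)) : insB new s = insSorted new s := by
  have hsplit : s.takeWhile (fun y => decide (y < new)) ++ s.dropWhile (fun y => decide (y < new)) = s :=
    List.takeWhile_append_dropWhile
  have hplen : (s.takeWhile (fun y => decide (y < new))).length ≤ s.length :=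
    (List.takeWhile_prefix _).length_le
  have hlensum : (s.takeWhile (fun y => decide (y < new))).length
      + (s.dropWhile (fun y => decide (y < new))).length = s.length := by
    have h0 := congrArg List.length hsplit
    rw [List.length_append] at h0
    exact h0
  have hlt : ∀ (k : Nat) (hk : k < s.length),
      k < (s.takeWhile (fun y => decide (y < new))).length → s[k] < new := by
    intro k hk hkp
    have h1 : s[k] = (s.takeWhile (fun y => decide (y < new))
        ++ s.dropWhile (fun y => decide (y < new)))[k]'(by rw [hsplit]; exact hk) :=
      List.getElem_of_eq hsplit.symm hk
    rw [h1, List.getElem_append_left hkp]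
    have h2 := List.mem_takeWhile_imp (List.getElem_mem (l := s.takeWhile (fun y => decide (y < new))) hkp)
    exact of_decide_eq_true h2
  have hge : ∀ (k : Nat) (hk : k < s.length),
      (s.takeWhile (fun y => decide (y < new))).length ≤ k → ¬ s[k] < new := by
    intro k hk hkp
    have hdw : s.dropWhile (fun y => decide (y < new)) ≠ [] := by
      intro h0
      have h1 : (s.dropWhile (fun y => decide (y < new))).length = 0 := by rw [h0]; rfl
      omega
    have hplt : (s.takeWhile (fun y => decide (y < new))).length < s.length := by
      have := List.length_pos_of_ne_nil hdw
      omega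
    have hhead : ¬ ((s.dropWhile (fun y => decide (y < new))).head hdw < new) := by
      have := List.head_dropWhile_not (fun y => decide (y < new)) hdw
      simpa using this
    have hboundary : s[(s.takeWhile (fun y => decide (y < new))).length]'hplt
        = (s.dropWhile (fun y => decide (y < new))).head hdw := by
      have h1 : s[(s.takeWhile (fun y => decide (y < new))).length]'hplt
          = (s.takeWhile (fun y => decide (y < new))
            ++ s.dropWhile (fun y => decide (y < new)))[(s.takeWhile (fun y => decide (y < new))).length]'(by rw [hsplit]; exact hplt) :=
        List.getElem_of_eq hsplit.symm hplt
      rw [h1, List.getElem_append_right (le_refl _)]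
      simp [List.getElem_zero]
    have hmono : s[(s.takeWhile (fun y => decide (y < new))).length]'hplt ≤ s[k] := by
      rcases Nat.eq_or_lt_of_le hkp with h | h
      · exact le_of_eq (by congr)
      · exact (List.pairwise_iff_getElem.1 hs) _ _ hplt hk h
    intro hcon
    rw [hboundary] at hmono
    exact hhead (lt_of_le_of_lt hmono hcon)
  have hpos : bsPos s.length s new 0 s.length = (s.takeWhile (fun y => decide (y < new))).length :=
    bsPos_eq_of_bounds s new _ hlt hge s.length 0 s.length (by omega) (Nat.zero_le _) hplen (le_refl _)
  unfold insB
  rw [hpos, insSorted_eq_takeWhile]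
  exact take_drop_of_append hsplit new

theorem popMin_eq_head {x a : Int} {xs s' : List Int}
    (hp : (x :: xs).Perm (a :: s')) (hs : (a :: s').Pairwise (· ≤ ·)) :
    popMin x xs = a := by
  rw [List.pairwise_cons] at hs
  have hmem : popMin x xs ∈ a :: s' := hp.mem_iff.1 (popMin_mem x xs)
  have h1 : a ≤ popMin x xs := by
    rcases List.mem_cons.1 hmem with h | h
    · omega
    · exact hs.1 _ h
  have h2 : popMin x xs ≤ a := popMin_le xs x a (hp.mem_iff.2 (by simp))
  omega

theorem go_eq (n : Nat) : ∀ (l s : List Int) (K ans : Int),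
    l.length ≤ n → l.Perm s → s.Pairwise (· ≤ ·) → goA l K ans = goB s K ans := by
  induction n with
  | zero =>
    intro l s K ans hn hp _
    have hl : l = [] := List.eq_nil_of_length_eq_zero (by omega)
    subst hl
    rw [hp.symm.eq_nil]
    simp [goA, goB]
  | succ n ih =>
    intro l s K ans hn hp hs
    match l, s with
    | [], s =>
      rw [hp.symm.eq_nil]
      simp [goA, goB]
    | x :: xs, [] =>
      exact absurd hp.length_eq (by simp)
    | x :: xs, a :: s' =>
      have hmin1 : popMin x xs = a := popMin_eq_head hp hs
      have hrest : ((x :: xs).erase a).Perm s' := by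
        have := hp.erase a
        simpa using this
      rw [goA.eq_def, goB.eq_def]
      simp only [hmin1]
      split
      · rfl
      · rw [List.pairwise_cons] at hs
        match hs' : s' with
        | [] =>
          have h0 : (x :: xs).erase a = [] := List.Perm.eq_nil hrest
          split
          · rfl
          · rename_i y ys hyys
            rw [hmin1, h0] at hyys
            exact absurd hyys (by simp)
        | b :: s'' =>
          split
          · rename_i h0
            rw [hmin1] at h0
            rw [h0] at hrest
            exact absurd hrest.length_eq (by simp)
          · rename_i y ys he
            rw [hmin1] at he
            rw [he] at hrest
            have hs'' : (b :: s'').Pairwise (· ≤ ·) := hs.2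
            have hmin2 : popMin y ys = b := popMin_eq_head hrest hs''
            rw [hmin2]
            show goA ((a + b * 2) :: (y :: ys).erase b) K (ans + 1) =
              goB (insB (a + 2 * b) s'') K (ans + 1)
            rw [insB_eq_insSorted (List.pairwise_cons.1 hs'').2]
            have hrest2 : ((y :: ys).erase b).Perm s'' := by
              have := hrest.erase b
              simpa using this
            have hperm : ((a + b * 2) :: (y :: ys).erase b).Perm (insSorted (a + 2 * b) s'') := by
              have hv : a + b * 2 = a + 2 * b := by ring
              rw [hv]
              exact ((hrest2.cons _).trans (insSorted_perm _ _).symm)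
            have hsorted : (insSorted (a + 2 * b) s'').Pairwise (· ≤ ·) := by
              rw [List.pairwise_cons] at hs''
              exact insSorted_pairwise hs''.2
            apply ih _ _ K (ans + 1) _ hperm hsorted
            have h1 := erase_len x xs
            have h2 := erase_len y ys
            rw [hmin1, he] at h1
            rw [hmin2] at h2
            simp only [List.length_cons] at *
            omega

-- ===== VERDICT (by name: the statement is the Claim_ definition above) =====
theorem solution_spec : Claim_equal_solution := by
  intro scoville K _ _
  unfold Spec_solution solution solution_alt
  exact go_eq scoville.length scoville _ K 0 le_rfl
    (PySem.List.sorted_perm scoville (fun x => x) false).symm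
    (by simpa using PySem.List.sorted_pairwise scoville (fun x => x))
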